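-- pv_equiv track=rewrite | github.com/zartwilly/python_topology_learning_simulation | simulation_50_graphes_PARALLELE.py | distance_hamming
-- ===== SOURCE A (Python) =====
-- def distance_hamming(edge_list_matE, edge_list_matE_LG):
--     """
--     but: comparer les 2 listes d'aretes et compter le nombre d'aretes differentes entre eux.
--     Ce nombre est le nombre de HAMMING
--
--     nbre_hamming : nbre d'elements differents entre matE et matE_
--     liste_cpt : liste d'aretes ou arcs  n'appartenant pas aux 2 matrices matE et matE_
--     """
--     liste_arc_diff = list(); set_arc_diff = set();
--     for arete in edge_list_matE:
--         """
--         case de 1 a 0 dans matE_LG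
--         aretes ABSENTE(s) de matE_LG mais PRESENCE(s) dans matE
--         """
--         if (arete[0], arete[1]) not in edge_list_matE_LG and \
--             (arete[1], arete[0]) not in edge_list_matE_LG:
--                 liste_arc_diff.append( (arete[0], arete[1]) )
--                 set_arc_diff.add( (arete[0], arete[1]) )
--     for arete in edge_list_matE_LG:
--         """
--         case de 1 a 0 dans matE
--         aretes ABSENTE(s) de matE mais PRESENCE(s) dans matE_LG
--         """
--         if (arete[0], arete[1]) not in edge_list_matE and \
--             (arete[1], arete[0]) not in edge_list_matE:
--                 liste_arc_diff.append( (arete[0], arete[1]) )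
--                 set_arc_diff.add( (arete[0], arete[1]) )
--
-- #    return len(liste_arc_diff), liste_arc_diff;
--     return len(set_arc_diff), set_arc_diff;
-- ===== SOURCE B (Python) =====
-- def distance_hamming(edge_list_matE, edge_list_matE_LG):
--     def canon(e):
--         return (e[0], e[1]) if e[0] <= e[1] else (e[1], e[0])
--     canon_E = {canon(e) for e in edge_list_matE}
--     canon_LG = {canon(e) for e in edge_list_matE_LG}
--     diff = canon_E ^ canon_LG
--     result = set()
--     for e in edge_list_matE + edge_list_matE_LG:
--         if canon(e) in diff:
--             result.add((e[0], e[1]))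
--     return len(result), result
-- ===== Notes on version B (the rewrite author's own statement) =====
-- stated objective: faster
-- what changed: Replaces A's two loops with a linear membership scan of the other edge list inside each iteration by canonicalizing edges to sorted keys, building two hash sets, taking their symmetric difference once, and filtering the concatenated lists against it in one pass.
import Mathlib
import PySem

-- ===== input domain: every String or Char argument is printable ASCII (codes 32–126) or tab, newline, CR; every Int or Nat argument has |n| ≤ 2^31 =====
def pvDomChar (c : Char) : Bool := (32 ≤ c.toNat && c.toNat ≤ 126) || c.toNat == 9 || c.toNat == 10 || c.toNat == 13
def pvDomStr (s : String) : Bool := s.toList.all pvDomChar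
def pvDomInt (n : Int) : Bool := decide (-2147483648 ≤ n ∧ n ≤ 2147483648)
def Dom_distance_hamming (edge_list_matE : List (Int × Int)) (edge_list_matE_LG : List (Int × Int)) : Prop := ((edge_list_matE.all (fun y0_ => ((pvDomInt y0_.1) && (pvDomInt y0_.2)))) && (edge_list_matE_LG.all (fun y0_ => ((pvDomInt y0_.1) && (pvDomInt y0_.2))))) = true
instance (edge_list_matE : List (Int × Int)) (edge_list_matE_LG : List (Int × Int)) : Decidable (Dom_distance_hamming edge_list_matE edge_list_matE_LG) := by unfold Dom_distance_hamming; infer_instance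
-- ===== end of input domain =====

-- B replaces A's per-edge scans of the other list by a canonical-key symmetric difference
-- built once, then one filtering pass over both lists (objective: faster, asymptotic).


-- ===== PORT A =====
-- state = (liste_arc_diff, set_arc_diff); two passes, each testing both orientations in the other list
def distance_hamming (edge_list_matE : List (Int × Int)) (edge_list_matE_LG : List (Int × Int)) : Int × (List (Int × Int)) :=
  let st1 : List (Int × Int) × PySem.Set (Int × Int) :=
    edge_list_matE.foldl (fun p arete =>
      if (arete.1, arete.2) ∉ edge_list_matE_LG ∧ (arete.2, arete.1) ∉ edge_list_matE_LG then
        (p.1 ++ [(arete.1, arete.2)], PySem.Set.add p.2 (arete.1, arete.2))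
      else p) ([], [])
  let st2 : List (Int × Int) × PySem.Set (Int × Int) :=
    edge_list_matE_LG.foldl (fun p arete =>
      if (arete.1, arete.2) ∉ edge_list_matE ∧ (arete.2, arete.1) ∉ edge_list_matE then
        (p.1 ++ [(arete.1, arete.2)], PySem.Set.add p.2 (arete.1, arete.2))
      else p) st1
  ((st2.2.length : Int), st2.2)

-- ===== PORT B =====
-- canonical undirected key: the edge with its endpoints sorted
def pvCanon (e : Int × Int) : Int × Int := if e.1 ≤ e.2 then (e.1, e.2) else (e.2, e.1)

def distance_hamming_alt (edge_list_matE : List (Int × Int)) (edge_list_matE_LG : List (Int × Int)) : Int × (List (Int × Int)) :=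
  let canonE : PySem.Set (Int × Int) := PySem.Set.ofList (edge_list_matE.map pvCanon)
  let canonLG : PySem.Set (Int × Int) := PySem.Set.ofList (edge_list_matE_LG.map pvCanon)
  let diff : PySem.Set (Int × Int) := PySem.Set.symmDiff canonE canonLG
  let result : PySem.Set (Int × Int) :=
    (edge_list_matE ++ edge_list_matE_LG).foldl (fun s e =>
      if pvCanon e ∈ diff then PySem.Set.add s (e.1, e.2) else s) []
  ((result.length : Int), result)

-- ===== PRECONDITION & SPEC =====
def Spec_distance_hamming (edge_list_matE : List (Int × Int)) (edge_list_matE_LG : List (Int × Int)) (out : Int × (List (Int × Int))) : Prop := out = distance_hamming_alt edge_list_matE edge_list_matE_LG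
instance (edge_list_matE : List (Int × Int)) (edge_list_matE_LG : List (Int × Int)) (out : Int × (List (Int × Int))) : Decidable (Spec_distance_hamming edge_list_matE edge_list_matE_LG out) := by unfold Spec_distance_hamming; infer_instance

-- ===== CLAIM (what is proved, stated in full; the proofs are below) =====
def Claim_equal_distance_hamming : Prop := ∀ (edge_list_matE : List (Int × Int)) (edge_list_matE_LG : List (Int × Int)), Dom_distance_hamming edge_list_matE edge_list_matE_LG → Spec_distance_hamming edge_list_matE edge_list_matE_LG (distance_hamming edge_list_matE edge_list_matE_LG)

-- ===== LEMMAS AND PROOFS =====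

-- two edges have the same canonical key iff one is the other or its swap
theorem pvCanon_eq_iff (f e : Int × Int) :
    pvCanon f = pvCanon e ↔ f = (e.1, e.2) ∨ f = (e.2, e.1) := by
  obtain ⟨a, b⟩ := f; obtain ⟨c, d⟩ := e
  simp only [pvCanon, Prod.ext_iff]
  split_ifs <;> simp_all <;> omega

-- canonical-key set membership reads back as orientation membership in the source list
theorem pvCanon_mem_ofList_map (e : Int × Int) (L : List (Int × Int)) :
    pvCanon e ∈ PySem.Set.ofList (L.map pvCanon) ↔ ((e.1, e.2) ∈ L ∨ (e.2, e.1) ∈ L) := by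
  rw [PySem.Set.mem_ofList, List.mem_map]
  constructor
  · rintro ⟨f, hf, hfe⟩
    rcases (pvCanon_eq_iff f e).1 hfe with h | h <;> [left; right] <;> simpa [← h]
  · rintro (h | h)
    · exact ⟨(e.1, e.2), h, (pvCanon_eq_iff _ e).2 (Or.inl rfl)⟩
    · exact ⟨(e.2, e.1), h, (pvCanon_eq_iff _ e).2 (Or.inr rfl)⟩

-- the set component of A's paired fold ignores liste_arc_diff
theorem pv_snd_foldl (c : Int × Int → Prop) [DecidablePred c]
    (L : List (Int × Int)) (p0 : List (Int × Int) × PySem.Set (Int × Int)) :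
    (L.foldl (fun p a =>
        if c a then (p.1 ++ [(a.1, a.2)], PySem.Set.add p.2 (a.1, a.2)) else p) p0).2
    = L.foldl (fun s a => if c a then PySem.Set.add s (a.1, a.2) else s) p0.2 := by
  induction L generalizing p0 with
  | nil => rfl
  | cons a t ih =>
    simp only [List.foldl_cons]
    split_ifs with h
    · exact ih _
    · exact ih _

-- B's per-element test agrees with A's on elements of the list being folded
theorem pv_fold_eq (L other : List (Int × Int)) (s0 : PySem.Set (Int × Int))
    (diff : PySem.Set (Int × Int))
    (hdiff : ∀ e ∈ L, (pvCanon e ∈ diff ↔ ((e.1, e.2) ∉ other ∧ (e.2, e.1) ∉ other))) :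
    L.foldl (fun s e => if pvCanon e ∈ diff then PySem.Set.add s (e.1, e.2) else s) s0
    = L.foldl (fun s a =>
        if (a.1, a.2) ∉ other ∧ (a.2, a.1) ∉ other then PySem.Set.add s (a.1, a.2) else s) s0 := by
  induction L generalizing s0 with
  | nil => rfl
  | cons a t ih =>
    simp only [List.foldl_cons]
    rw [show (if pvCanon a ∈ diff then PySem.Set.add s0 (a.1, a.2) else s0)
        = (if (a.1, a.2) ∉ other ∧ (a.2, a.1) ∉ other then PySem.Set.add s0 (a.1, a.2) else s0) by
      by_cases h : pvCanon a ∈ diff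
      · rw [if_pos h, if_pos ((hdiff a (by simp)).1 h)]
      · rw [if_neg h, if_neg (fun hc => h ((hdiff a (by simp)).2 hc))]]
    exact ih _ (fun e he => hdiff e (by simp [he]))

theorem pv_diff_mem (E LG : List (Int × Int)) (e : Int × Int) :
    pvCanon e ∈ PySem.Set.symmDiff (PySem.Set.ofList (E.map pvCanon))
      (PySem.Set.ofList (LG.map pvCanon))
    ↔ (((e.1, e.2) ∈ E ∨ (e.2, e.1) ∈ E) ↔ ¬((e.1, e.2) ∈ LG ∨ (e.2, e.1) ∈ LG)) := by
  rw [PySem.Set.mem_symmDiff, pvCanon_mem_ofList_map, pvCanon_mem_ofList_map]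
  tauto

-- ===== VERDICT (by name: the statement is the Claim_ definition above) =====
theorem distance_hamming_spec : Claim_equal_distance_hamming := by
  intro E LG _
  unfold Spec_distance_hamming distance_hamming distance_hamming_alt
  dsimp only
  rw [List.foldl_append]
  rw [pv_snd_foldl, pv_snd_foldl]
  rw [pv_fold_eq E LG _ _ (fun e he => by
        rw [pv_diff_mem]
        constructor
        · intro h
          have : (e.1, e.2) ∈ E := by obtain ⟨a, b⟩ := e; exact he
          tauto
        · intro h; tauto)]
  rw [pv_fold_eq LG E _ _ (fun e he => by
        rw [pv_diff_mem]
        constructor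
        · intro h
          have : (e.1, e.2) ∈ LG := by obtain ⟨a, b⟩ := e; exact he
          tauto
        · intro h; tauto)]
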